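-- pv_equiv track=rewrite | github.com/SoNotWildTurtle/ImpFinal | imp/security/imp-identity-verifier.py | build_status_bitmap
-- ===== SOURCE A (Python) =====
-- from typing import Callable, Iterable, List, Mapping, MutableMapping, Optional, Sequence, MutableSet
--
-- def build_status_bitmap(flags: Sequence[bool]) -> str:
--     """Return a hex-encoded bitmap where set bits represent revoked entries."""
--
--     if not flags:
--         return "0x"
--
--     byte_count = (len(flags) + 7) // 8
--     data = bytearray(byte_count)
--     for index, flagged in enumerate(flags):
--         if flagged:
--             byte_index = index // 8
--             bit_index = index % 8
--             data[byte_index] |= 1 << bit_index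
--     return "0x" + bytes(data).hex()
-- ===== SOURCE B (Python) =====
-- def build_status_bitmap(flags) -> str:
--     """Return a hex-encoded bitmap where set bits represent revoked entries."""
--     if not flags:
--         return "0x"
--     n = sum(1 << i for i, f in enumerate(flags) if f)
--     return "0x" + n.to_bytes((len(flags) + 7) // 8, "little").hex()
-- ===== Notes on version B (the rewrite author's own statement) =====
-- stated objective: idiomatic
-- what changed: B accumulates one integer by summing 1<<i over the set flags and lets int.to_bytes perform the little-endian byte splitting, replacing A's pre-sized bytearray with manual index//8 / index%8 bit surgery.
import Mathlib
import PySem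

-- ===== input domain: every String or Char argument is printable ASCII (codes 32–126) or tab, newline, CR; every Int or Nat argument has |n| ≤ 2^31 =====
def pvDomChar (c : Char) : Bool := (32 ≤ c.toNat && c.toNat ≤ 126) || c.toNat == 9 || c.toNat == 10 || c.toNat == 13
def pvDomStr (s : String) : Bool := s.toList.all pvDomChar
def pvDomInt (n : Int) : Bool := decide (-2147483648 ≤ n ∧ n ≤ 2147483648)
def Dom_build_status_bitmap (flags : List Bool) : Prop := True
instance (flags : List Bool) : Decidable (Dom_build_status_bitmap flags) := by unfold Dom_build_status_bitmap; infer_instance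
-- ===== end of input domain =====

-- B replaces A's pre-sized bytearray and manual index//8 / index%8 bit surgery by one
-- accumulated integer converted with int.to_bytes(..., "little") (objective: idiomatic).

-- shared hex rendering (bytes.hex() in both Pythons): lowercase, two digits per byte
def hexDigit (n : Nat) : Char := if n < 10 then Char.ofNat (48 + n) else Char.ofNat (87 + n)
def byteHex (b : Nat) : List Char := [hexDigit (b / 16), hexDigit (b % 16)]
def hexOfBytes (bs : List Nat) : String := String.mk (bs.flatMap byteHex)

-- ===== PORT A =====
-- loop body of A: data[index//8] |= 1 << index%8 ; the indexed access data[byte_index]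
-- is always in range (index < len(flags) ≤ 8*byte_count), so getD/set are exact here.
def stepA (st : List Nat × Nat) (flagged : Bool) : List Nat × Nat :=
  if flagged then
    let byte_index := st.2 / 8
    let bit_index := st.2 % 8
    (st.1.set byte_index ((st.1.getD byte_index 0) ||| (1 <<< bit_index)), st.2 + 1)
  else (st.1, st.2 + 1)

def build_status_bitmap (flags : List Bool) : String :=
  if flags = [] then "0x"
  else
    let byte_count := (flags.length + 7) / 8
    let data := (flags.foldl stepA (List.replicate byte_count 0, 0)).1
    "0x" ++ hexOfBytes data

-- ===== PORT B =====
-- n = sum(1 << i for i, f in enumerate(flags) if f), carrying the index in the fold state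
def stepB (st : Nat × Nat) (f : Bool) : Nat × Nat :=
  (if f then st.1 + (1 <<< st.2) else st.1, st.2 + 1)

-- n.to_bytes(k, "little"): k bytes, least significant first
def toBytesLE : Nat → Nat → List Nat
  | 0, _ => []
  | k + 1, n => n % 256 :: toBytesLE k (n / 256)

def build_status_bitmap_alt (flags : List Bool) : String :=
  if flags = [] then "0x"
  else
    let n := (flags.foldl stepB (0, 0)).1
    "0x" ++ hexOfBytes (toBytesLE ((flags.length + 7) / 8) n)

-- ===== PRECONDITION & SPEC =====
def Spec_build_status_bitmap (flags : List Bool) (out : String) : Prop := out = build_status_bitmap_alt flags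
instance (flags : List Bool) (out : String) : Decidable (Spec_build_status_bitmap flags out) := by unfold Spec_build_status_bitmap; infer_instance

-- ===== CLAIM (what is proved, stated in full; the proofs are below) =====
def Claim_equal_build_status_bitmap : Prop := ∀ (flags : List Bool), Dom_build_status_bitmap flags → Spec_build_status_bitmap flags (build_status_bitmap flags)

-- ===== LEMMAS AND PROOFS =====

-- the bytes of n, little-endian, as an indexed map
def mB (bc n : Nat) : List Nat := (List.range bc).map (fun b => n / 2 ^ (8 * b) % 256)

lemma toBytesLE_eq_mB (k : Nat) : ∀ n, toBytesLE k n = mB k n := by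
  induction k with
  | zero => intro n; rfl
  | succ k ih =>
    intro n
    rw [toBytesLE, ih, mB, mB, List.range_succ_eq_map, List.map_cons, List.map_map]
    congr 1
    · simp
    · apply List.map_congr_left
      intro b _
      show n / 256 / 2 ^ (8 * b) % 256 = n / 2 ^ (8 * (b + 1)) % 256
      rw [Nat.div_div_eq_div_mul]
      congr 2
      rw [Nat.mul_add, pow_add]
      ring

lemma mB_zero (bc : Nat) : mB bc 0 = List.replicate bc 0 := by
  simp [mB]

lemma length_mB (bc n : Nat) : (mB bc n).length = bc := by simp [mB]

lemma getElem_mB (bc n b : Nat) (h : b < bc) :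
    (mB bc n)[b]'(by simp [length_mB, h]) = n / 2 ^ (8 * b) % 256 := by
  simp [mB]

-- OR with a strictly larger power of two is addition (bitwise disjoint)
lemma lor_two_pow_of_lt {x r : Nat} (h : x < 2 ^ r) : 2 ^ r ||| x = 2 ^ r + x := by
  apply Nat.eq_of_testBit_eq
  intro i
  rcases lt_trichotomy i r with hi | hi | hi
  · rw [Nat.testBit_lor, Nat.testBit_two_pow, Nat.testBit_two_pow_add_gt hi]
    simp [Nat.ne_of_gt hi]
  · subst hi
    rw [Nat.testBit_lor, Nat.testBit_two_pow_self, Nat.testBit_two_pow_add_eq,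
      Nat.testBit_lt_two_pow h]
    simp
  · have hx : x.testBit i = false :=
      Nat.testBit_lt_two_pow (lt_of_lt_of_le h (Nat.pow_le_pow_right (by norm_num) hi.le))
    have hsum : 2 ^ r + x < 2 ^ i := by
      have h2 : (2 : Nat) ^ (r + 1) ≤ 2 ^ i := Nat.pow_le_pow_right (by norm_num) hi
      have := Nat.pow_succ 2 r; omega
    rw [Nat.testBit_lor, Nat.testBit_two_pow, Nat.testBit_lt_two_pow hsum, hx]
    simp [Nat.ne_of_lt hi]

-- setting bit idx of n, done byte-wise as A does, equals the bytes of n + 2^idx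
lemma set_bit_eq (bc n idx : Nat) (hn : n < 2 ^ idx) (hlt : idx < 8 * bc) :
    (mB bc n).set (idx / 8) ((mB bc n).getD (idx / 8) 0 ||| (1 <<< (idx % 8)))
      = mB bc (n + 2 ^ idx) := by
  have hq : idx / 8 < bc := by omega
  have hgetD : (mB bc n).getD (idx / 8) 0 = n / 2 ^ (8 * (idx / 8)) % 256 := by
    rw [List.getD_eq_getElem _ _ (by simp [length_mB, hq])]
    exact getElem_mB bc n _ hq
  apply List.ext_getElem
  · simp [length_mB]
  intro b h1 h2
  have hb : b < bc := by simpa [length_mB] using h2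
  rw [getElem_mB bc (n + 2 ^ idx) b hb]
  by_cases hbq : b = idx / 8
  · subst hbq
    rw [List.getElem_set_self (by simp [length_mB]; omega)]
    rw [hgetD]
    -- byte b = idx/8 : n/2^(8b) < 2^(idx%8), OR becomes addition, no carry out of the byte
    have hqle : 8 * (idx / 8) ≤ idx := by omega
    have hr : idx % 8 < 8 := Nat.mod_lt _ (by omega)
    have hsplit : 2 ^ idx = 2 ^ (idx % 8) * 2 ^ (8 * (idx / 8)) := by
      rw [← pow_add]; congr 1; omega
    have hdiv_lt : n / 2 ^ (8 * (idx / 8)) < 2 ^ (idx % 8) := by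
      rw [Nat.div_lt_iff_lt_mul (Nat.pow_pos (by norm_num))]
      calc n < 2 ^ idx := hn
        _ = 2 ^ (idx % 8) * 2 ^ (8 * (idx / 8)) := hsplit
    have hsmall : n / 2 ^ (8 * (idx / 8)) < 256 := by
      calc n / 2 ^ (8 * (idx / 8)) < 2 ^ (idx % 8) := hdiv_lt
        _ ≤ 2 ^ 8 := Nat.pow_le_pow_right (by norm_num) (by omega)
    have hdivadd : (n + 2 ^ idx) / 2 ^ (8 * (idx / 8))
        = n / 2 ^ (8 * (idx / 8)) + 2 ^ (idx % 8) := by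
      rw [hsplit, Nat.add_mul_div_right _ _ (Nat.pow_pos (by norm_num))]
    rw [hdivadd]
    have hlor : n / 2 ^ (8 * (idx / 8)) % 256 ||| (1 <<< (idx % 8))
        = n / 2 ^ (8 * (idx / 8)) + 2 ^ (idx % 8) := by
      rw [Nat.mod_eq_of_lt hsmall, Nat.one_shiftLeft, Nat.lor_comm,
        lor_two_pow_of_lt hdiv_lt, Nat.add_comm]
    rw [hlor]
    have : n / 2 ^ (8 * (idx / 8)) + 2 ^ (idx % 8) < 256 := by
      have : (2 : Nat) ^ (idx % 8) ≤ 2 ^ 7 := Nat.pow_le_pow_right (by norm_num) (by omega)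
      have h7 : (2:Nat) ^ 7 = 128 := by norm_num
      omega
    rw [Nat.mod_eq_of_lt this]
  · rw [List.getElem_set_ne (by omega), getElem_mB bc n b hb]
    rcases Nat.lt_or_ge b (idx / 8) with hcase | hcase
    · -- byte below the touched one: adding 2^idx adds a multiple of 256 to this byte's quotient
      have h8 : 8 * b + 8 ≤ idx := by omega
      have hsplit : 2 ^ idx = 2 ^ (idx - 8 * b - 8) * 256 * 2 ^ (8 * b) := by
        have : (256 : Nat) = 2 ^ 8 := by norm_num
        rw [this, ← pow_add, ← pow_add]; congr 1; omega
      rw [hsplit, Nat.add_mul_div_right _ _ (Nat.pow_pos (by norm_num)),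
        Nat.add_mul_mod_self_right]
    · -- byte above the touched one: both quotients are 0
      have hb8 : idx + 1 ≤ 8 * b := by omega
      have h1 : n / 2 ^ (8 * b) = 0 := by
        apply Nat.div_eq_of_lt
        calc n < 2 ^ idx := hn
          _ ≤ 2 ^ (8 * b) := Nat.pow_le_pow_right (by norm_num) (by omega)
      have h2 : (n + 2 ^ idx) / 2 ^ (8 * b) = 0 := by
        apply Nat.div_eq_of_lt
        calc n + 2 ^ idx < 2 ^ idx + 2 ^ idx := by omega
          _ = 2 ^ (idx + 1) := by ring
          _ ≤ 2 ^ (8 * b) := Nat.pow_le_pow_right (by norm_num) hb8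
      rw [h1, h2]

-- loop invariant: A's byte array is always the little-endian bytes of B's accumulator
lemma loop_eq (bc : Nat) (fs : List Bool) : ∀ (idx n : Nat), n < 2 ^ idx →
    idx + fs.length ≤ 8 * bc →
    (fs.foldl stepA (mB bc n, idx)).1 = mB bc ((fs.foldl stepB (n, idx)).1) := by
  induction fs with
  | nil => intro idx n _ _; rfl
  | cons f fs ih =>
    intro idx n hn hlen
    cases f with
    | false =>
      rw [List.foldl_cons, List.foldl_cons,
        show stepA (mB bc n, idx) false = (mB bc n, idx + 1) from rfl,
        show stepB (n, idx) false = (n, idx + 1) from rfl]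
      exact ih (idx + 1) n (lt_trans hn (Nat.pow_lt_pow_right (by norm_num) (by omega)))
        (by simp at hlen; omega)
    | true =>
      have hlt : idx < 8 * bc := by simp at hlen; omega
      rw [List.foldl_cons, List.foldl_cons,
        show stepA (mB bc n, idx) true
          = ((mB bc n).set (idx / 8) ((mB bc n).getD (idx / 8) 0 ||| (1 <<< (idx % 8))), idx + 1)
          from rfl,
        show stepB (n, idx) true = (n + (1 <<< idx), idx + 1) from rfl,
        set_bit_eq bc n idx hn hlt, Nat.one_shiftLeft idx]
      exact ih (idx + 1) (n + 2 ^ idx)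
        (by have := Nat.pow_succ 2 idx; omega)
        (by simp at hlen ⊢; omega)

-- ===== VERDICT (by name: the statement is the Claim_ definition above) =====
theorem build_status_bitmap_spec : Claim_equal_build_status_bitmap := by
  intro flags _
  unfold Spec_build_status_bitmap build_status_bitmap build_status_bitmap_alt
  by_cases h : flags = []
  · simp [h]
  · simp only [if_neg h]
    rw [toBytesLE_eq_mB, ← mB_zero ((flags.length + 7) / 8),
      loop_eq ((flags.length + 7) / 8) flags 0 0 (by norm_num) (by omega)]
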